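-- pv_equiv track=rewrite | github.com/pypi-data/pypi-mirror-107 | packages/mugmoment/mugmoment-0.2.2-py3-none-any.whl/mugmoment/converters.py | _process_badges
-- ===== SOURCE A (Python) =====
-- def _process_badges(badges):
--     new_badges = {}
--
--     for badge in badges:
--         set_id = badge["setID"]
--         version = badge["version"]
--
--         if set_id not in new_badges:
--             new_badges[set_id] = {}
--
--         new_badges[set_id][version] = badge
--
--     return new_badges
-- ===== SOURCE B (Python) =====
-- def _process_badges(badges):
--     order = list(dict.fromkeys(b["setID"] for b in badges))
--     return {
--         sid: {b["version"]: b for b in badges if b["setID"] == sid}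
--         for sid in order
--     }
-- ===== Notes on version B (the rewrite author's own statement) =====
-- stated objective: alternative
-- what changed: Replaces A's single accumulating pass with its membership check by a two-phase decomposition: an ordered dedup of the setIDs via dict.fromkeys, then one dict comprehension per key rebuilt from the filtered badge list.
import Mathlib
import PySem

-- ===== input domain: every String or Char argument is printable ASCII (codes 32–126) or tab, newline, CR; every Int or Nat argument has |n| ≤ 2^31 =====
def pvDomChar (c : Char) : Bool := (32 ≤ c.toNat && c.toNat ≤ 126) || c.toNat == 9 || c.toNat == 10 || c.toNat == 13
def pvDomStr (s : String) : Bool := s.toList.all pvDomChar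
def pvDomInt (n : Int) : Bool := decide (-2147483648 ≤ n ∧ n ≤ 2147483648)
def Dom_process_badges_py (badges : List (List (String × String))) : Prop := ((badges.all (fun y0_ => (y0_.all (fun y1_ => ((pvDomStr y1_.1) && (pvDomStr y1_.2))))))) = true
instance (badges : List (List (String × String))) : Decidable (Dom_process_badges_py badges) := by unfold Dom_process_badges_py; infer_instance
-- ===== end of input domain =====

-- B replaces A's single accumulating pass (with its membership check) by a two-phase
-- decomposition: ordered dedup of the setIDs, then one grouped rebuild per key. Objective: alternative.

-- ===== PORT A =====
-- exact Python dict lookup d[k] on an association list: first matching key, none = KeyError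
def dget? {α : Type} (d : List (String × α)) (k : String) : Option α :=
  match d with
  | [] => none
  | (k', v) :: rest => if k' == k then some v else dget? rest k

-- exact Python dict assignment d[k] = v: overwrite in place, new key appends
def dinsert {α : Type} (d : List (String × α)) (k : String) (v : α) : List (String × α) :=
  match d with
  | [] => [(k, v)]
  | (k', v') :: rest => if k' == k then (k', v) :: rest else (k', v') :: dinsert rest k v

def process_badges_py (badges : List (List (String × String))) : List (String × List (String × List (String × String))) :=
  badges.foldl
    (fun new_badges badge =>
      let set_id := (dget? badge "setID").getD ""
      let version := (dget? badge "version").getD ""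
      let new_badges := if (dget? new_badges set_id).isSome then new_badges
                        else dinsert new_badges set_id []
      dinsert new_badges set_id (dinsert ((dget? new_badges set_id).getD []) version badge))
    []

-- ===== PORT B =====
def process_badges_py_alt (badges : List (List (String × String))) : List (String × List (String × List (String × String))) :=
  let order := PySem.List.dedup (badges.map (fun b => (dget? b "setID").getD ""))
  order.map (fun sid =>
    (sid,
      (badges.filter (fun b => ((dget? b "setID").getD "") == sid)).foldl
        (fun d b => dinsert d ((dget? b "version").getD "") b) []))

-- ===== PRECONDITION & SPEC =====
-- Pre_ excludes exactly the inputs on which Python A raises KeyError: a badge missing the "setID" or "version" key.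
def Pre_process_badges_py (badges : List (List (String × String))) : Prop :=
  ∀ b ∈ badges, "setID" ∈ b.map Prod.fst ∧ "version" ∈ b.map Prod.fst
instance (badges : List (List (String × String))) : Decidable (Pre_process_badges_py badges) := by unfold Pre_process_badges_py; infer_instance
def pvWitness_process_badges_py : (List (List (String × String))) :=
  [[("setID", "1"), ("version", "a")], [("setID", "2"), ("version", "b")], [("setID", "1"), ("version", "c")]]

def Spec_process_badges_py (badges : List (List (String × String))) (out : List (String × List (String × List (String × String)))) : Prop := out = process_badges_py_alt badges
instance (badges : List (List (String × String))) (out : List (String × List (String × List (String × String)))) : Decidable (Spec_process_badges_py badges out) := by unfold Spec_process_badges_py; infer_instance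

-- ===== CLAIM (what is proved, stated in full; the proofs are below) =====
def Claim_equal_process_badges_py : Prop := ∀ (badges : List (List (String × String))), Dom_process_badges_py badges → Pre_process_badges_py badges → Spec_process_badges_py badges (process_badges_py badges)

-- ===== LEMMAS AND PROOFS =====

def sidOf (b : List (String × String)) : String := (dget? b "setID").getD ""
def verOf (b : List (String × String)) : String := (dget? b "version").getD ""
def innerStep (d : List (String × List (String × String))) (b : List (String × String)) : List (String × List (String × String)) :=
  dinsert d (verOf b) b
def stepA (nb : List (String × List (String × List (String × String)))) (b : List (String × String)) : List (String × List (String × List (String × String))) :=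
  dinsert nb (sidOf b) (dinsert ((dget? nb (sidOf b)).getD []) (verOf b) b)
def groupKeys (ks : List String) : List (List (String × String)) → List String
  | [] => []
  | b :: bs => if ks.contains (sidOf b) then groupKeys ks bs
               else sidOf b :: groupKeys (ks ++ [sidOf b]) bs

theorem dinsert_dinsert_same {α : Type} (d : List (String × α)) (k : String) (v w : α) :
    dinsert (dinsert d k v) k w = dinsert d k w := by
  induction d with
  | nil => simp only [dinsert, beq_self_eq_true, if_pos]
  | cons p rest ih =>
    obtain ⟨k', v'⟩ := p
    by_cases h : k' == k
    · simp only [dinsert, h, if_pos]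
    · simp only [dinsert, h, Bool.false_eq_true, if_neg, ih, not_false_iff]

theorem dget?_dinsert_self {α : Type} (d : List (String × α)) (k : String) (v : α) :
    dget? (dinsert d k v) k = some v := by
  induction d with
  | nil => simp only [dinsert, dget?, beq_self_eq_true, if_pos]
  | cons p rest ih =>
    obtain ⟨k', v'⟩ := p
    by_cases h : k' == k
    · simp only [dinsert, dget?, h, if_pos]
    · simp only [dinsert, dget?, h, Bool.false_eq_true, if_neg, ih, not_false_iff]

theorem mem_groupKeys_not_contains (bs : List (List (String × String))) :
    ∀ (ks : List String) (x : String), x ∈ groupKeys ks bs → ks.contains x = false := by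
  induction bs with
  | nil => intro ks x h; simp [groupKeys] at h
  | cons b bs ih =>
    intro ks x h
    rw [groupKeys] at h
    by_cases hc : ks.contains (sidOf b)
    · rw [if_pos hc] at h
      exact ih ks x h
    · rw [if_neg hc] at h
      rcases List.mem_cons.mp h with rfl | h
      · exact Bool.eq_false_iff.mpr hc
      · have h2 := ih (ks ++ [sidOf b]) x h
        rw [List.contains_append] at h2
        exact (Bool.or_eq_false_iff.mp h2).1

theorem groupKeys_eq_foldl_add (bs : List (List (String × String))) :
    ∀ ks : List String, ks ++ groupKeys ks bs = List.foldl PySem.Set.add ks (bs.map sidOf) := by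
  induction bs with
  | nil => intro ks; simp [groupKeys]
  | cons b bs ih =>
    intro ks
    rw [groupKeys, List.map_cons, List.foldl_cons]
    by_cases hc : ks.contains (sidOf b)
    · rw [if_pos hc, ih ks]
      congr 1
      have hm : sidOf b ∈ ks := by simpa using hc
      simp [PySem.Set.add, hm]
    · have hm : sidOf b ∉ ks := by simpa using hc
      have hadd : PySem.Set.add ks (sidOf b) = ks ++ [sidOf b] := by
        simp [PySem.Set.add, hm]
      rw [if_neg hc, hadd, ← ih (ks ++ [sidOf b]), List.append_assoc, List.singleton_append]

theorem dget?_eq_none_of_not_mem {α : Type} (d : List (String × α)) (k : String)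
    (h : k ∉ d.map Prod.fst) : dget? d k = none := by
  induction d with
  | nil => rfl
  | cons p rest ih =>
    obtain ⟨k', v⟩ := p
    simp only [List.map_cons, List.mem_cons, not_or] at h
    rw [dget?, if_neg (by simp only [beq_iff_eq]; exact fun e => h.1 e.symm)]
    exact ih h.2

theorem dinsert_of_not_mem {α : Type} (d : List (String × α)) (k : String) (v : α)
    (h : k ∉ d.map Prod.fst) : dinsert d k v = d ++ [(k, v)] := by
  induction d with
  | nil => rfl
  | cons p rest ih =>
    obtain ⟨k', v'⟩ := p
    simp only [List.map_cons, List.mem_cons, not_or] at h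
    rw [dinsert, if_neg (by simp only [beq_iff_eq]; exact fun e => h.1 e.symm)]
    simp [ih h.2]

theorem body_eq_stepA (nb : List (String × List (String × List (String × String)))) (b : List (String × String)) :
    (let set_id := (dget? b "setID").getD ""
     let version := (dget? b "version").getD ""
     let nb' := if (dget? nb set_id).isSome then nb else dinsert nb set_id []
     dinsert nb' set_id (dinsert ((dget? nb' set_id).getD []) version b)) = stepA nb b := by
  by_cases h : (dget? nb ((dget? b "setID").getD "")).isSome
  · simp [stepA, sidOf, verOf, h]
  · simp only [h, Bool.false_eq_true, if_false, stepA, sidOf, verOf]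
    rw [dget?_dinsert_self, dinsert_dinsert_same]
    rw [Option.not_isSome_iff_eq_none] at h
    simp [h]

theorem map_dinsert_update (bs : List (List (String × String))) (b : List (String × String))
    (acc : List (String × List (String × List (String × String))))
    (hnd : (acc.map Prod.fst).Nodup) (hmem : sidOf b ∈ acc.map Prod.fst) :
    (dinsert acc (sidOf b) (dinsert ((dget? acc (sidOf b)).getD []) (verOf b) b)).map
        (fun p => (p.1, List.foldl innerStep p.2 (bs.filter (fun x => sidOf x == p.1)))) =
      acc.map (fun p => (p.1, List.foldl innerStep p.2 ((b :: bs).filter (fun x => sidOf x == p.1)))) := by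
  induction acc with
  | nil => simp at hmem
  | cons p rest ih =>
    obtain ⟨k, d⟩ := p
    simp only [List.map_cons, List.nodup_cons] at hnd
    by_cases hk : (k == sidOf b : Bool)
    · have hkeq : k = sidOf b := by simpa using hk
      rw [dinsert, if_pos hk, dget?, if_pos hk]
      simp only [Option.getD_some, List.map_cons]
      congr 1
      · show (k, List.foldl innerStep (dinsert d (verOf b) b) _) = _
        rw [List.filter_cons, if_pos (by simp [hkeq])]
        rfl
      · apply List.map_congr_left
        intro q hq
        have hqk : q.1 ≠ sidOf b := by
          intro he; exact hnd.1 (hkeq ▸ he ▸ List.mem_map_of_mem hq)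
        rw [List.filter_cons, if_neg (by simp only [beq_iff_eq]; exact fun e => hqk e.symm)]
    · have hkne : k ≠ sidOf b := by simpa using hk
      have hmem' : sidOf b ∈ rest.map Prod.fst := by
        rcases List.mem_cons.mp hmem with h | h
        · exact absurd h.symm hkne
        · exact h
      rw [dinsert, if_neg (by simpa using hk), dget?, if_neg (by simpa using hk)]
      simp only [List.map_cons]
      congr 1
      · rw [List.filter_cons, if_neg (by simp only [beq_iff_eq]; exact fun e => hkne e.symm)]
      · exact ih hnd.2 hmem'

theorem foldl_stepA_eq (bs : List (List (String × String))) :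
    ∀ acc : List (String × List (String × List (String × String))), (acc.map Prod.fst).Nodup →
      List.foldl stepA acc bs =
        acc.map (fun p => (p.1, List.foldl innerStep p.2 (bs.filter (fun x => sidOf x == p.1)))) ++
          (groupKeys (acc.map Prod.fst) bs).map
            (fun s => (s, List.foldl innerStep [] (bs.filter (fun x => sidOf x == s)))) := by
  induction bs with
  | nil => intro acc _; simp [groupKeys]
  | cons b bs ih =>
    intro acc hnd
    rw [List.foldl_cons]
    by_cases hmem : sidOf b ∈ acc.map Prod.fst
    · have hkeys : (stepA acc b).map Prod.fst = acc.map Prod.fst := by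
        rw [stepA]
        clear ih hnd
        induction acc with
        | nil => simp at hmem
        | cons p rest ih2 =>
          obtain ⟨k, d⟩ := p
          by_cases hk : (k == sidOf b : Bool)
          · rw [dinsert, if_pos hk, dget?, if_pos hk]
            simp
          · have hmem' : sidOf b ∈ rest.map Prod.fst := by
              rcases List.mem_cons.mp hmem with h | h
              · exact absurd (by simp [h]) hk
              · exact h
            rw [dinsert, if_neg (by simpa using hk), dget?, if_neg (by simpa using hk)]
            simp only [List.map_cons]
            rw [ih2 hmem']
      rw [ih _ (hkeys ▸ hnd), hkeys]
      have hc : (acc.map Prod.fst).contains (sidOf b) = true := by simpa using hmem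
      rw [(by rw [groupKeys, if_pos hc] :
        groupKeys (acc.map Prod.fst) (b :: bs) = groupKeys (acc.map Prod.fst) bs)]
      congr 1
      · exact map_dinsert_update bs b acc hnd hmem
      · apply List.map_congr_left
        intro s hs
        have hns := mem_groupKeys_not_contains bs _ s hs
        have hsne : sidOf b ≠ s := by
          intro he; rw [he] at hc; rw [hc] at hns; exact absurd hns (by decide)
        rw [List.filter_cons, if_neg (by simpa using hsne)]
    · have hget : dget? acc (sidOf b) = none := dget?_eq_none_of_not_mem _ _ hmem
      have hstep : stepA acc b = acc ++ [(sidOf b, dinsert [] (verOf b) b)] := by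
        rw [stepA, hget]
        exact dinsert_of_not_mem _ _ _ hmem
      have hnd' : (((acc ++ [(sidOf b, dinsert [] (verOf b) b)]).map Prod.fst)).Nodup := by
        rw [List.map_append]
        refine List.Nodup.append hnd (by simp) ?_
        intro a ha hb
        simp only [List.map_cons, List.map_nil, List.mem_singleton] at hb
        exact hmem (hb ▸ ha)
      rw [hstep, ih _ hnd']
      have hc : (acc.map Prod.fst).contains (sidOf b) = false := by
        rw [Bool.eq_false_iff]
        exact fun h => hmem (by simpa using h)
      have hgk : groupKeys (acc.map Prod.fst) (b :: bs) =
          sidOf b :: groupKeys (acc.map Prod.fst ++ [sidOf b]) bs := by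
        rw [groupKeys, if_neg (by rw [hc]; simp)]
      rw [hgk]
      simp only [List.map_append, List.map_cons, List.map_nil]
      rw [List.append_assoc]
      congr 1
      · apply List.map_congr_left
        intro q hq
        have hqk : sidOf b ≠ q.1 := fun he => hmem (he ▸ List.mem_map_of_mem hq)
        rw [List.filter_cons, if_neg (by simpa using hqk)]
      · rw [List.singleton_append]
        congr 1
        · rw [List.filter_cons, if_pos (by simp)]
          rfl
        · apply List.map_congr_left
          intro s' hs'
          have h2 := mem_groupKeys_not_contains bs _ s' hs'
          have hne : sidOf b ≠ s' := by
            intro he; rw [List.contains_append] at h2; simp [he] at h2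
          rw [List.filter_cons, if_neg (by simpa using hne)]

theorem process_badges_py_eq_fold (badges : List (List (String × String))) :
    process_badges_py badges = List.foldl stepA [] badges := by
  unfold process_badges_py
  congr 1
  funext nb b
  exact body_eq_stepA nb b

theorem alt_eq_groupKeys (badges : List (List (String × String))) :
    process_badges_py_alt badges =
      (groupKeys [] badges).map
        (fun s => (s, List.foldl innerStep [] (badges.filter (fun x => sidOf x == s)))) := by
  unfold process_badges_py_alt
  have h : PySem.List.dedup (badges.map (fun b => (dget? b "setID").getD "")) = groupKeys [] badges := by
    rw [PySem.List.dedup_eq_ofList, PySem.Set.ofList_eq_foldl]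
    exact (groupKeys_eq_foldl_add badges []).symm
  rw [h]
  rfl

-- ===== VERDICT (by name: the statement is the Claim_ definition above) =====
theorem process_badges_py_spec : Claim_equal_process_badges_py := by
  intro badges _ _
  unfold Spec_process_badges_py
  rw [process_badges_py_eq_fold, alt_eq_groupKeys, foldl_stepA_eq badges [] (by simp)]
  rfl
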